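-- pv_equiv track=rewrite | github.com/galliot-us/smart-social-distancing | libs/utils/metrics.py | process_face_labels_for_object
-- ===== SOURCE A (Python) =====
-- from typing import List, Tuple
--
-- PROCESSING_COUNT_THRESHOLD = 3
--
-- def process_face_labels_for_object(face_labels: List[int])-> Tuple[int, int]:
--     """
--     Receives a list with the "facesmask detections" (for a single person) and returns a
--     tuple with the summary of faces and mask detected. Consecutive detections in the same state are
--     grouped and returned as a single one. Detections lower than the constant PROCESSING_COUNT_THRESHOLD
--     are ignored.
--
--     For example, the input [0, 0, 0, 0, 0, 1, 0, 0, 1, 1, 1, 1 1, 1,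
--     -1, -1, -1, -1, -1, -1, 0, 0, 0, 0] returns (3, 2).
--     """
--     # TODO: This is the first version of the metrics and is implemented to feed the current dashboard.
--     # When we define the new metrics we will need to change that logic
--     face_detections = 0
--     mask_detections = 0
--     current_status = None
--     processing_status = None
--     processing_count = 0
--
--     for face_label in face_labels:
--         if processing_status != face_label:
--             processing_status = face_label
--             processing_count = 0
--         processing_count += 1
--         if current_status != processing_status and processing_count >= PROCESSING_COUNT_THRESHOLD:
--             # FaceLabel was enouth time in the same state, change it
--             current_status = processing_status
--             if current_status != -1:
--                 # A face was detected
--                 face_detections += 1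
--             if current_status == 0:
--                 # A mask was detected
--                 mask_detections += 1
--     return face_detections, mask_detections
-- ===== SOURCE B (Python) =====
-- from typing import List, Tuple
--
-- PROCESSING_COUNT_THRESHOLD = 3
--
-- def process_face_labels_for_object(face_labels: List[int]) -> Tuple[int, int]:
--     face_detections = 0
--     mask_detections = 0
--     current_status = None
--     i = 0
--     n = len(face_labels)
--     while i < n:
--         # maximal run of equal values starting at i: [i, j)
--         value = face_labels[i]
--         j = i
--         while j < n and face_labels[j] == value:
--             j += 1
--         if j - i >= PROCESSING_COUNT_THRESHOLD and value != current_status: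
--             current_status = value
--             if value != -1:
--                 face_detections += 1
--             if value == 0:
--                 mask_detections += 1
--         i = j
--     return face_detections, mask_detections
-- ===== Notes on version B (the rewrite author's own statement) =====
-- stated objective: alternative
-- what changed: B decomposes the input into maximal runs of equal labels and commits each qualifying run (length >= 3 and value != current status) once, instead of A's per-element state machine with a processing counter.
import Mathlib
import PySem

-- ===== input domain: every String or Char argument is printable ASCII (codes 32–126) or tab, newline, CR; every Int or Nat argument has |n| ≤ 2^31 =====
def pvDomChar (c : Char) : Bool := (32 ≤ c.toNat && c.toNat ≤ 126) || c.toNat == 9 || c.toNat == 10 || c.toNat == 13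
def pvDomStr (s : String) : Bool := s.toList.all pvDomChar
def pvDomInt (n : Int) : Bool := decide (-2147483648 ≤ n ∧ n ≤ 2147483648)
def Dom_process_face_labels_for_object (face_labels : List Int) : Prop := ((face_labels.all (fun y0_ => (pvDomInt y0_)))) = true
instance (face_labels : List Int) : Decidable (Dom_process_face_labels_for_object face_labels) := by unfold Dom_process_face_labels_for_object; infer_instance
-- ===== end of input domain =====

-- B replaces A's per-element counter/state machine by an explicit decomposition into maximal runs,
-- committing once per run of length ≥ 3 (objective: alternative/simpler decomposition; same cost).


-- ===== PORT A =====
-- state: (face_detections, mask_detections, current_status, processing_status, processing_count)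
def pfloStepA : (Int × Int × Option Int × Option Int × Int) → Int → (Int × Int × Option Int × Option Int × Int)
  | (fd, md, cur, ps, pc), x =>
    let (ps2, pc2) : Option Int × Int := if ps ≠ some x then (some x, 0) else (ps, pc)
    let pc3 := pc2 + 1
    if cur ≠ ps2 ∧ pc3 ≥ 3 then
      let cur2 := ps2
      let fd2 := if cur2 ≠ some (-1) then fd + 1 else fd
      let md2 := if cur2 = some 0 then md + 1 else md
      (fd2, md2, cur2, ps2, pc3)
    else
      (fd, md, cur, ps2, pc3)

def process_face_labels_for_object (face_labels : List Int) : Int × Int :=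
  let r := face_labels.foldl pfloStepA (0, 0, none, none, 0)
  (r.1, r.2.1)

-- ===== PORT B =====
-- run-based loop of Source B: split off the maximal leading run, commit it once if long enough
def pfloGoB (cur : Option Int) (fd md : Int) : List Int → Int × Int
  | [] => (fd, md)
  | x :: rest =>
    -- _split_run: run length and remainder of the maximal leading run of x's
    let k : Int := 1 + (rest.takeWhile (· == x)).length
    let rest' := rest.dropWhile (· == x)
    if k ≥ 3 ∧ cur ≠ some x then
      pfloGoB (some x) (if x ≠ -1 then fd + 1 else fd) (if x = 0 then md + 1 else md) rest'
    else
      pfloGoB cur fd md rest'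
termination_by l => l.length
decreasing_by
  all_goals
    simp only [List.length_cons]
    exact Nat.lt_succ_of_le (List.length_dropWhile_le _ _)

def process_face_labels_for_object_alt (face_labels : List Int) : Int × Int :=
  pfloGoB none 0 0 face_labels

-- ===== PRECONDITION & SPEC =====
def Spec_process_face_labels_for_object (face_labels : List Int) (out : Int × Int) : Prop := out = process_face_labels_for_object_alt face_labels
instance (face_labels : List Int) (out : Int × Int) : Decidable (Spec_process_face_labels_for_object face_labels out) := by unfold Spec_process_face_labels_for_object; infer_instance

-- ===== CLAIM (what is proved, stated in full; the proofs are below) =====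
def Claim_equal_process_face_labels_for_object : Prop := ∀ (face_labels : List Int), Dom_process_face_labels_for_object face_labels → Spec_process_face_labels_for_object face_labels (process_face_labels_for_object face_labels)

-- ===== LEMMAS AND PROOFS =====

-- one step of A inside a run whose value is already the processing status
lemma pfloStepA_same (fd md : Int) (cur : Option Int) (x : Int) (pc : Int) :
    pfloStepA (fd, md, cur, some x, pc) x =
      if cur ≠ some x ∧ pc + 1 ≥ 3 then
        ((if x ≠ -1 then fd + 1 else fd), (if x = 0 then md + 1 else md), some x, some x, pc + 1)
      else (fd, md, cur, some x, pc + 1) := by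
  simp [pfloStepA]

-- A's fold over a run whose value equals current_status: only the counter moves
lemma pfloFold_rep_stick (k : Nat) (fd md : Int) (x : Int) :
    ∀ pc : Int, List.foldl pfloStepA (fd, md, some x, some x, pc) (List.replicate k x)
      = (fd, md, some x, some x, pc + k) := by
  induction k with
  | zero => intro pc; simp
  | succ k ih =>
    intro pc
    rw [List.replicate_succ, List.foldl_cons, pfloStepA_same]
    simp only [ne_eq, not_true_eq_false, false_and, if_false, ih]
    rw [show pc + 1 + (k : Int) = pc + ((k + 1 : Nat) : Int) by push_cast; ring]

-- A's fold over a run whose value differs from current_status: commits iff the count reaches 3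
lemma pfloFold_rep_new (k : Nat) (fd md : Int) (cur : Option Int) (x : Int)
    (hcur : cur ≠ some x) :
    ∀ pc : Int, List.foldl pfloStepA (fd, md, cur, some x, pc) (List.replicate k x)
      = if 1 ≤ k ∧ pc + k ≥ 3 then
          ((if x ≠ -1 then fd + 1 else fd), (if x = 0 then md + 1 else md), some x, some x, pc + k)
        else (fd, md, cur, some x, pc + k) := by
  induction k with
  | zero => intro pc; simp
  | succ k ih =>
    intro pc
    rw [List.replicate_succ, List.foldl_cons, pfloStepA_same]
    by_cases h3 : pc + 1 ≥ 3
    · rw [if_pos ⟨hcur, h3⟩, pfloFold_rep_stick,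
        show pc + 1 + (k : Int) = pc + ((k + 1 : Nat) : Int) by push_cast; ring]
      rw [if_pos (show 1 ≤ k + 1 ∧ pc + ((k + 1 : Nat) : Int) ≥ 3 from
        ⟨by omega, by push_cast; omega⟩)]
    · rw [if_neg (fun hh => h3 hh.2), ih (pc + 1),
        show pc + 1 + (k : Int) = pc + ((k + 1 : Nat) : Int) by push_cast; ring]
      by_cases hc : 1 ≤ k ∧ pc + ((k + 1 : Nat) : Int) ≥ 3
      · rw [if_pos hc, if_pos (show 1 ≤ k + 1 ∧ pc + ((k + 1 : Nat) : Int) ≥ 3 from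
          ⟨by omega, hc.2⟩)]
      · rw [if_neg hc, if_neg (show ¬(1 ≤ k + 1 ∧ pc + ((k + 1 : Nat) : Int) ≥ 3) by
          push_cast at hc ⊢; omega)]

lemma pfloTakeWhile_replicate (x : Int) (l : List Int) :
    l.takeWhile (· == x) = List.replicate (l.takeWhile (· == x)).length x := by
  apply List.eq_replicate_of_mem
  intro b hb
  have := List.mem_takeWhile_imp hb
  simpa using this.symm

lemma pfloDropWhile_head (x : Int) (l : List Int) (y : Int) (t : List Int)
    (h : l.dropWhile (· == x) = y :: t) : y ≠ x := by
  have hlen : 0 < (l.dropWhile (· == x)).length := by rw [h]; simp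
  have := List.dropWhile_get_zero_not (· == x) l hlen
  simp only [List.get_eq_getElem, h] at this
  simpa using this

-- main lemma: at a run boundary (processing_status differs from the head), A's fold agrees with B's run loop
lemma pfloMain : ∀ (n : Nat) (l : List Int), l.length ≤ n →
    ∀ (cur ps : Option Int) (fd md pc : Int),
      (∀ x rest, l = x :: rest → ps ≠ some x) →
      (let r := List.foldl pfloStepA (fd, md, cur, ps, pc) l; (r.1, r.2.1)) = pfloGoB cur fd md l := by
  intro n
  induction n with
  | zero =>
    intro l hl cur ps fd md pc _
    have hnil : l = [] := List.length_eq_zero_iff.mp (Nat.le_zero.mp hl)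
    subst hnil
    simp [pfloGoB]
  | succ n ih =>
    intro l hl cur ps fd md pc hps
    match l with
    | [] => simp [pfloGoB]
    | x :: rest =>
      have hdec : rest = rest.takeWhile (· == x) ++ rest.dropWhile (· == x) :=
        (List.takeWhile_append_dropWhile).symm
      set k := (rest.takeWhile (· == x)).length with hk
      set rest' := rest.dropWhile (· == x) with hr
      have hrep : rest = List.replicate k x ++ rest' := by
        conv_lhs => rw [hdec]
        rw [← pfloTakeWhile_replicate]
      have hB : pfloGoB cur fd md (x :: rest) =
          (if (1 + (k : Int) ≥ 3 ∧ cur ≠ some x) then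
            pfloGoB (some x) (if x ≠ -1 then fd + 1 else fd) (if x = 0 then md + 1 else md) rest'
          else pfloGoB cur fd md rest') := by
        conv_lhs => rw [pfloGoB]
      -- first step: processing_status resets to x, count to 1; no commit (1 < 3)
      have hstep1 : pfloStepA (fd, md, cur, ps, pc) x = (fd, md, cur, some x, 1) := by
        have hne : ps ≠ some x := hps x rest rfl
        simp [pfloStepA, hne]
      have hrlen : rest'.length ≤ n := by
        have h1 : rest'.length ≤ rest.length := List.length_dropWhile_le _ _
        simp at hl; omega
      have hps' : ∀ y t, rest' = y :: t → (some x : Option Int) ≠ some y := by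
        intro y t hyt
        have := pfloDropWhile_head x rest y t hyt
        simp [this.symm]
      rw [hB, List.foldl_cons, hstep1]
      conv_lhs => rw [hrep]
      rw [List.foldl_append]
      by_cases hcur : cur = some x
      · subst hcur
        rw [pfloFold_rep_stick, ih rest' hrlen (some x) (some x) fd md (1 + k) hps',
          if_neg (by simp)]
      · rw [pfloFold_rep_new k fd md cur x hcur]
        by_cases hbig : (1 : Int) + k ≥ 3
        · rw [if_pos (show 1 ≤ k ∧ (1 : Int) + k ≥ 3 from ⟨by omega, hbig⟩),
            if_pos (show (1 : Int) + k ≥ 3 ∧ cur ≠ some x from ⟨hbig, hcur⟩)]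
          exact ih rest' hrlen (some x) (some x) _ _ (1 + k) hps'
        · rw [if_neg (fun hh => hbig hh.2), if_neg (fun hh => hbig hh.1)]
          exact ih rest' hrlen cur (some x) fd md (1 + k) hps'

-- ===== VERDICT (by name: the statement is the Claim_ definition above) =====
theorem process_face_labels_for_object_spec : Claim_equal_process_face_labels_for_object := by
  intro l _
  show _ = _
  unfold process_face_labels_for_object process_face_labels_for_object_alt
  exact pfloMain l.length l le_rfl none none 0 0 0 (by intro x rest h; simp)
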